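-- pv_equiv track=rewrite | github.com/csc302-fall-2020/proj-TBD | backend/app.py | get_latest_forms
-- ===== SOURCE A (Python) =====
-- def get_latest_form(form_lst):
--     max_version = max([x['CreateTime'] for x in form_lst])
--
--     return [x for x in form_lst if x['CreateTime'] == max_version][0]
--
-- def get_latest_forms(form_lst, key='FormID'):
--     # Condense all duplicate FormIDs into a list
--     form_dict = {}
--     for form in form_lst:
--         if form[key] in form_dict:
--             form_dict[form[key]].append(form)
--         else:
--             form_dict[form[key]] = [form]
--
--     # For each FormID, get the latest version of the form
--     latest_form_lst = []
--     for formID in form_dict: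
--         latest_form_lst.append(get_latest_form(form_dict[formID]))
--
--     return latest_form_lst
-- ===== SOURCE B (Python) =====
-- def get_latest_forms(form_lst, key='FormID'):
--     # One streaming pass: keep, per key, the current best (earliest maximum CreateTime) form.
--     best = {}
--     for form in form_lst:
--         k = form[key]
--         b = best.get(k)
--         if b is None or b['CreateTime'] < form['CreateTime']:
--             best[k] = form
--     return list(best.values())
-- ===== Notes on version B (the rewrite author's own statement) =====
-- stated objective: simpler
-- what changed: Replaces the group-into-lists dict plus a per-group max-and-filter second phase by a single streaming pass that keeps, per key, the current best form (replaced only on strictly greater CreateTime), returning the dict's values.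
import Mathlib
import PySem

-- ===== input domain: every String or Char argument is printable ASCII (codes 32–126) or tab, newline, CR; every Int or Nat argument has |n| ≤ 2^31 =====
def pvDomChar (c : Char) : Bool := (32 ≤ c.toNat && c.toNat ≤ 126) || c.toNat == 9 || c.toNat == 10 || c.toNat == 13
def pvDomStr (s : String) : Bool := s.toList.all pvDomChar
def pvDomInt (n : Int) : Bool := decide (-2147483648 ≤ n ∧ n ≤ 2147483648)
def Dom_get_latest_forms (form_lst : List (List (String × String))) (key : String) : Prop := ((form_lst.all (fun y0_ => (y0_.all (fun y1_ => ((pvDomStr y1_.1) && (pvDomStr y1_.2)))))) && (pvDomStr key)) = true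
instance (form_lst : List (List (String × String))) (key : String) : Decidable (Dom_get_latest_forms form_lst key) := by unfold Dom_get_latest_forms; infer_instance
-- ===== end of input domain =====

-- B replaces A's two-phase algorithm (group all forms into a dict of lists, then per group
-- take the max CreateTime and filter for it) by a single streaming pass keeping, per key,
-- the current best form (replaced only on strictly greater CreateTime); objective: simpler.

-- ===== PORT A =====
-- form[k] on a form dict; Pre_ excludes the KeyError (missing key) case, so the default is never reached
def pv_get (form : List (String × String)) (k : String) : String :=
  ((PySem.Dict.mk form).get? k).getD ""

def get_latest_form (form_lst : List (List (String × String))) : List (String × String) :=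
  let max_version := (PySem.List.max? (form_lst.map (fun x => pv_get x "CreateTime")) id).getD ""
  ((form_lst.filter (fun x => pv_get x "CreateTime" == max_version)).headD [])

def get_latest_forms (form_lst : List (List (String × String))) (key : String) : List (List (String × String)) :=
  let form_dict := form_lst.foldl (fun d form =>
      if d.contains (pv_get form key) then d.modify (pv_get form key) [] (fun g => g ++ [form])
      else d.insert (pv_get form key) [form]) PySem.Dict.empty
  form_dict.keys.foldl (fun acc formID => acc ++ [get_latest_form (form_dict.getD formID [])]) []

-- ===== PORT B =====
def get_latest_forms_alt (form_lst : List (List (String × String))) (key : String) : List (List (String × String)) :=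
  (form_lst.foldl (fun best form =>
      let k := pv_get form key
      match best.get? k with
      | none => best.insert k form
      | some b => if pv_get b "CreateTime" < pv_get form "CreateTime" then best.insert k form else best)
    PySem.Dict.empty).values

-- ===== PRECONDITION & SPEC =====
-- Pre_ excludes exactly the inputs on which the Python A raises KeyError: a form missing `key` or 'CreateTime'.
def Pre_get_latest_forms (form_lst : List (List (String × String))) (key : String) : Prop :=
  (form_lst.all (fun form => ((PySem.Dict.mk form).get? key).isSome
    && ((PySem.Dict.mk form).get? "CreateTime").isSome)) = true
instance (form_lst : List (List (String × String))) (key : String) : Decidable (Pre_get_latest_forms form_lst key) := by unfold Pre_get_latest_forms; infer_instance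

def pvWitness_get_latest_forms : (List (List (String × String))) × String :=
  ([[("FormID", "1"), ("CreateTime", "2020")], [("FormID", "1"), ("CreateTime", "2021")]], "FormID")

def Spec_get_latest_forms (form_lst : List (List (String × String))) (key : String) (out : List (List (String × String))) : Prop := out = get_latest_forms_alt form_lst key
instance (form_lst : List (List (String × String))) (key : String) (out : List (List (String × String))) : Decidable (Spec_get_latest_forms form_lst key out) := by unfold Spec_get_latest_forms; infer_instance

-- ===== CLAIM (what is proved, stated in full; the proofs are below) =====
def Claim_equal_get_latest_forms : Prop := ∀ (form_lst : List (List (String × String))) (key : String), Dom_get_latest_forms form_lst key → Pre_get_latest_forms form_lst key → Spec_get_latest_forms form_lst key (get_latest_forms form_lst key)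

-- ===== LEMMAS AND PROOFS =====

def pvCt (x : List (String × String)) : String := pv_get x "CreateTime"

def pvStep (m x : List (String × String)) : List (String × String) :=
  if pvCt m < pvCt x then x else m

def pvFM (a : List (String × String)) (t : List (List (String × String))) : List (String × String) :=
  t.foldl pvStep a

def pvStepF (acc : Option (List (String × String))) (x : List (String × String)) :
    Option (List (String × String)) :=
  match acc with | none => some x | some m => if pvCt m < pvCt x then some x else some m

def pvStepS (acc : Option String) (v : String) : Option String :=
  match acc with | none => some v | some m => if m < v then some v else some m

theorem pvFM_cons (a b : List (String × String)) (t : List (List (String × String))) :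
    pvFM a (b :: t) = pvFM (pvStep a b) t := rfl

theorem pvFM_eq_or_lt (t : List (List (String × String))) (a : List (String × String)) :
    pvFM a t = a ∨ pvCt a < pvCt (pvFM a t) := by
  induction t generalizing a with
  | nil => exact Or.inl rfl
  | cons b t ih =>
    rw [pvFM_cons]
    by_cases h : pvCt a < pvCt b
    · rw [show pvStep a b = b from if_pos h]
      rcases ih b with h' | h'
      · rw [h']; exact Or.inr h
      · exact Or.inr (lt_trans h h')
    · rw [show pvStep a b = a from if_neg h]
      exact ih a

theorem pvStepF_some (a b : List (String × String)) :
    pvStepF (some a) b = some (pvStep a b) := by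
  unfold pvStepF pvStep
  exact (apply_ite some _ b a).symm

theorem pvFoldF_some (t : List (List (String × String))) (a : List (String × String)) :
    List.foldl pvStepF (some a) t = some (pvFM a t) := by
  induction t generalizing a with
  | nil => rfl
  | cons b t ih => rw [List.foldl_cons, pvStepF_some, ih, pvFM_cons]

theorem pvMaxF_eq (l : List (List (String × String))) :
    PySem.List.max? l pvCt = List.foldl pvStepF none l := by
  unfold PySem.List.max? pvStepF
  congr 1
  funext acc x
  cases acc <;> rfl

theorem pvMaxS_eq (l : List String) :
    PySem.List.max? l id = List.foldl pvStepS none l := by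
  unfold PySem.List.max? pvStepS
  congr 1
  funext acc v
  cases acc <;> rfl

theorem pvMax_some (t : List (List (String × String))) (a : List (String × String)) :
    PySem.List.max? (a :: t) pvCt = some (pvFM a t) := by
  rw [pvMaxF_eq]; exact pvFoldF_some t a

theorem pvMax_map_aux (t : List (List (String × String))) (a : List (String × String)) :
    List.foldl pvStepS (some (pvCt a)) (t.map pvCt) = (List.foldl pvStepF (some a) t).map pvCt := by
  induction t generalizing a with
  | nil => rfl
  | cons b t ih =>
    rw [List.map_cons, List.foldl_cons, List.foldl_cons, pvStepF_some,
        show pvStepS (some (pvCt a)) (pvCt b) = some (pvCt (pvStep a b)) from by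
          show (if pvCt a < pvCt b then some (pvCt b) else some (pvCt a))
              = some (pvCt (if pvCt a < pvCt b then b else a))
          by_cases h : pvCt a < pvCt b
          · rw [if_pos h, if_pos h]
          · rw [if_neg h, if_neg h]]
    exact ih (pvStep a b)

theorem pvMax_map (t : List (List (String × String))) :
    PySem.List.max? (t.map pvCt) id = (PySem.List.max? t pvCt).map pvCt := by
  cases t with
  | nil => rfl
  | cons a t =>
    rw [pvMaxS_eq, pvMaxF_eq, List.map_cons, List.foldl_cons, List.foldl_cons,
        show pvStepS none (pvCt a) = some (pvCt a) from rfl,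
        show pvStepF none a = some a from rfl]
    exact pvMax_map_aux t a

theorem pvFirst_filter (t : List (List (String × String))) (a : List (String × String)) :
    ((a :: t).filter (fun x => pvCt x == pvCt (pvFM a t))).headD [] = pvFM a t := by
  induction t generalizing a with
  | nil => simp [pvFM]
  | cons b t ih =>
    rw [pvFM_cons]
    by_cases h : pvCt a < pvCt b
    · rw [show pvStep a b = b from if_pos h]
      have hm : pvCt b ≤ pvCt (pvFM b t) := by
        rcases pvFM_eq_or_lt t b with h' | h'
        · rw [h']
        · exact le_of_lt h'
      have ha : (pvCt a == pvCt (pvFM b t)) = false :=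
        beq_eq_false_iff_ne.mpr (fun he => absurd (he ▸ lt_of_lt_of_le h hm) (lt_irrefl _))
      simp only [List.filter_cons, ha, Bool.false_eq_true, if_false]
      have hb := ih b
      simp only [List.filter_cons] at hb
      exact hb
    · rw [show pvStep a b = a from if_neg h]
      rcases pvFM_eq_or_lt t a with h' | h'
      · rw [h']
        simp only [List.filter_cons, beq_self_eq_true, if_true, List.headD_cons]
      · have ha : (pvCt a == pvCt (pvFM a t)) = false :=
          beq_eq_false_iff_ne.mpr (fun he => absurd (he ▸ h') (lt_irrefl _))
        have hb : (pvCt b == pvCt (pvFM a t)) = false :=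
          beq_eq_false_iff_ne.mpr
            (fun he => absurd (he ▸ lt_of_le_of_lt (le_of_not_gt h) h') (lt_irrefl _))
        have := ih a
        simp only [List.filter_cons, ha, Bool.false_eq_true, if_false] at this
        simp only [List.filter_cons, ha, hb, Bool.false_eq_true, if_false]
        exact this

theorem glf_cons (a : List (String × String)) (t : List (List (String × String))) :
    get_latest_form (a :: t) = pvFM a t := by
  show ((a :: t).filter
      (fun x => pvCt x == (PySem.List.max? ((a :: t).map pvCt) id).getD "")).headD [] = pvFM a t
  rw [pvMax_map, pvMax_some]
  exact pvFirst_filter t a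

theorem glf_singleton (x : List (String × String)) : get_latest_form [x] = x := by
  rw [show ([x] : List (List (String × String))) = [x] from rfl, glf_cons]; rfl

theorem glf_append (a : List (String × String)) (t : List (List (String × String)))
    (x : List (String × String)) :
    get_latest_form ((a :: t) ++ [x]) =
      if pvCt (get_latest_form (a :: t)) < pvCt x then x else get_latest_form (a :: t) := by
  rw [show ((a :: t) ++ [x]) = a :: (t ++ [x]) from rfl, glf_cons, glf_cons]
  show pvFM a (t ++ [x]) = pvStep (pvFM a t) x
  rw [pvFM, pvFM, List.foldl_append, List.foldl_cons, List.foldl_nil]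

def pvInv (dA : PySem.Dict String (List (List (String × String))))
    (dB : PySem.Dict String (List (String × String))) : Prop :=
  dB.items = dA.items.map (fun p => (p.1, get_latest_form p.2)) ∧
  (∀ p ∈ dA.items, p.2 ≠ []) ∧
  (dA.items.map Prod.fst).Nodup

theorem pv_contains_eq {dA : PySem.Dict String (List (List (String × String)))}
    {dB : PySem.Dict String (List (String × String))} (h : pvInv dA dB) (k : String) :
    dB.contains k = dA.contains k := by
  simp only [PySem.Dict.contains, h.1, List.any_map]
  rfl

theorem pv_get?_eq {dA : PySem.Dict String (List (List (String × String)))}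
    {dB : PySem.Dict String (List (String × String))} (h : pvInv dA dB) (k : String) :
    dB.get? k = (dA.get? k).map get_latest_form := by
  simp only [PySem.Dict.get?, h.1, List.find?_map, Option.map_map]
  rfl

theorem pv_get?_none {κ ν : Type} [BEq κ] (d : PySem.Dict κ ν) (k : κ)
    (h : d.contains k = false) : d.get? k = none := by
  simp only [PySem.Dict.contains, List.any_eq_false] at h
  simp only [PySem.Dict.get?, List.find?_eq_none.mpr h, Option.map_none]

theorem pv_get?_contains {κ ν : Type} [BEq κ] (d : PySem.Dict κ ν) (k : κ)
    (h : d.contains k = true) : ∃ v, d.get? k = some v := by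
  simp only [PySem.Dict.contains, List.any_eq_true] at h
  obtain ⟨p, hp, hpk⟩ := h
  have hs : (List.find? (fun p => p.1 == k) d.items).isSome := List.find?_isSome.mpr ⟨p, hp, hpk⟩
  obtain ⟨q, hq⟩ := Option.isSome_iff_exists.mp hs
  exact ⟨q.2, by simp only [PySem.Dict.get?, hq, Option.map_some]⟩

theorem pvInv_step (key : String)
    (dA : PySem.Dict String (List (List (String × String))))
    (dB : PySem.Dict String (List (String × String)))
    (h : pvInv dA dB) (form : List (String × String)) :
    pvInv (if dA.contains (pv_get form key) then dA.modify (pv_get form key) [] (fun g => g ++ [form])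
            else dA.insert (pv_get form key) [form])
          (match dB.get? (pv_get form key) with
            | none => dB.insert (pv_get form key) form
            | some b => if pv_get b "CreateTime" < pv_get form "CreateTime" then dB.insert (pv_get form key) form else dB) := by
  set k := pv_get form key with hk
  by_cases hc : dA.contains k = true
  · -- key already present: A appends to the group, B compares CreateTimes
    obtain ⟨gl, hgl⟩ := pv_get?_contains dA k hc
    obtain ⟨p0, hp0⟩ : ∃ p0, List.find? (fun p => p.1 == k) dA.items = some p0 := by
      cases hfind : List.find? (fun p => p.1 == k) dA.items with
      | none => simp [PySem.Dict.get?, hfind] at hgl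
      | some p0 => exact ⟨p0, rfl⟩
    have hp0mem : p0 ∈ dA.items := List.mem_of_find?_eq_some hp0
    have hp0k : p0.1 = k := by
      have := List.find?_some hp0
      exact eq_of_beq this
    have hp0gl : p0.2 = gl := by
      simp only [PySem.Dict.get?, hp0, Option.map_some, Option.some.injEq] at hgl
      exact hgl
    have hglne : gl ≠ [] := hp0gl ▸ h.2.1 p0 hp0mem
    obtain ⟨ga, gt, hgcons⟩ := List.exists_cons_of_ne_nil hglne
    have hBget : dB.get? k = some (get_latest_form gl) := by
      rw [pv_get?_eq h, hgl, Option.map_some]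
    have hgetD : dA.getD k [] = gl := by rw [PySem.Dict.getD, hgl, Option.getD_some]
    have hglfapp : get_latest_form (gl ++ [form]) =
        if pvCt (get_latest_form gl) < pvCt form then form else get_latest_form gl := by
      rw [hgcons]; exact glf_append ga gt form
    have hcB : dB.contains k = true := by rw [pv_contains_eq h, hc]
    have hAstep : (if dA.contains k then dA.modify k [] (fun g => g ++ [form])
        else dA.insert k [form]) = PySem.Dict.mk (dA.items.map
          (fun p => if p.1 == k then (k, gl ++ [form]) else p)) := by
      rw [if_pos hc, PySem.Dict.modify, hgetD, PySem.Dict.insert, if_pos hc]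
    rw [hAstep, hBget,
      show (match some (get_latest_form gl) with
            | none => dB.insert k form
            | some b => if pv_get b "CreateTime" < pv_get form "CreateTime" then dB.insert k form else dB)
          = (if pv_get (get_latest_form gl) "CreateTime" < pv_get form "CreateTime" then dB.insert k form else dB) from rfl]
    by_cases hlt : pv_get (get_latest_form gl) "CreateTime" < pv_get form "CreateTime"
    · have hlt' : pvCt (get_latest_form gl) < pvCt form := hlt
      rw [if_pos hlt]
      have hBstep : dB.insert k form = PySem.Dict.mk (dB.items.map
          (fun p => if p.1 == k then (k, form) else p)) := by
        rw [PySem.Dict.insert, if_pos hcB]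
      rw [hBstep]
      refine ⟨?_, ?_, ?_⟩
      · simp only [h.1, List.map_map]
        apply List.map_congr_left
        intro p hp
        by_cases hpk : (p.1 == k) = true
        · simp only [Function.comp_apply, hpk, if_true, hglfapp, if_pos hlt']
        · simp only [Function.comp_apply, hpk, Bool.false_eq_true, if_false]
      · intro p hp
        obtain ⟨q, hq, hqe⟩ := List.mem_map.mp hp
        by_cases hqk : (q.1 == k) = true
        · rw [← hqe]; simp only [hqk, if_true]
          exact fun hcontra => List.append_ne_nil_of_right_ne_nil gl (by simp) hcontra
        · rw [← hqe]; simp only [hqk, Bool.false_eq_true, if_false]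
          exact h.2.1 q hq
      · have : (dA.items.map (fun p => if p.1 == k then (k, gl ++ [form]) else p)).map Prod.fst
            = dA.items.map Prod.fst := by
          rw [List.map_map]
          apply List.map_congr_left
          intro p hp
          by_cases hpk : (p.1 == k) = true
          · simp only [Function.comp_apply, hpk, if_true]
            exact (eq_of_beq hpk).symm
          · simp only [Function.comp_apply, hpk, Bool.false_eq_true, if_false]
        rw [this]; exact h.2.2
    · have hlt' : ¬ pvCt (get_latest_form gl) < pvCt form := hlt
      rw [if_neg hlt]
      refine ⟨?_, ?_, ?_⟩
      · rw [h.1, List.map_map]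
        apply (List.map_congr_left ?_).symm
        intro p hp
        by_cases hpk : (p.1 == k) = true
        · have hpp0 : p = p0 := by
            apply List.inj_on_of_nodup_map h.2.2 hp hp0mem
            rw [eq_of_beq hpk, hp0k]
          simp only [Function.comp_apply, hpk, if_true, hglfapp, if_neg hlt']
          rw [hpp0, hp0gl, hp0k]
        · simp only [Function.comp_apply, hpk, Bool.false_eq_true, if_false]
      · intro p hp
        obtain ⟨q, hq, hqe⟩ := List.mem_map.mp hp
        by_cases hqk : (q.1 == k) = true
        · rw [← hqe]; simp only [hqk, if_true]
          exact fun hcontra => List.append_ne_nil_of_right_ne_nil gl (by simp) hcontra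
        · rw [← hqe]; simp only [hqk, Bool.false_eq_true, if_false]
          exact h.2.1 q hq
      · have : (dA.items.map (fun p => if p.1 == k then (k, gl ++ [form]) else p)).map Prod.fst
            = dA.items.map Prod.fst := by
          rw [List.map_map]
          apply List.map_congr_left
          intro p hp
          by_cases hpk : (p.1 == k) = true
          · simp only [Function.comp_apply, hpk, if_true]
            exact (eq_of_beq hpk).symm
          · simp only [Function.comp_apply, hpk, Bool.false_eq_true, if_false]
        rw [this]; exact h.2.2
  · -- fresh key: both sides append
    have hc' : dA.contains k = false := by simpa using hc
    have hcB : dB.contains k = false := by rw [pv_contains_eq h, hc']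
    have hBget : dB.get? k = none := pv_get?_none dB k hcB
    rw [hBget]
    have hAstep : (if dA.contains k then dA.modify k [] (fun g => g ++ [form])
        else dA.insert k [form]) = PySem.Dict.mk (dA.items ++ [(k, [form])]) := by
      rw [if_neg (by rw [hc']; exact Bool.false_ne_true), PySem.Dict.insert,
        if_neg (by rw [hc']; exact Bool.false_ne_true)]
    have hBstep : dB.insert k form = PySem.Dict.mk (dB.items ++ [(k, form)]) := by
      rw [PySem.Dict.insert, if_neg (by rw [hcB]; exact Bool.false_ne_true)]
    rw [hAstep, hBstep]
    refine ⟨?_, ?_, ?_⟩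
    · simp only [List.map_append, List.map_cons, List.map_nil, h.1, glf_singleton]
    · intro p hp
      rcases List.mem_append.mp hp with hp' | hp'
      · exact h.2.1 p hp'
      · rw [List.mem_singleton.mp hp']; simp
    · rw [List.map_append]
      refine List.Nodup.append h.2.2 (List.nodup_singleton _) ?_
      intro x hx hx'
      simp only [List.map_cons, List.map_nil, List.mem_singleton] at hx'
      rw [hx'] at hx
      obtain ⟨q, hq, hqk⟩ := List.mem_map.mp hx
      have hcq : dA.contains k = true := by
        simp only [PySem.Dict.contains, List.any_eq_true]
        exact ⟨q, hq, beq_iff_eq.mpr hqk⟩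
      rw [hc'] at hcq
      exact Bool.false_ne_true hcq

theorem pvInv_foldl (key : String) (l : List (List (String × String)))
    (dA : PySem.Dict String (List (List (String × String))))
    (dB : PySem.Dict String (List (String × String))) (h : pvInv dA dB) :
    pvInv (l.foldl (fun d form =>
        if d.contains (pv_get form key) then d.modify (pv_get form key) [] (fun g => g ++ [form])
        else d.insert (pv_get form key) [form]) dA)
      (l.foldl (fun best form =>
        match best.get? (pv_get form key) with
        | none => best.insert (pv_get form key) form
        | some b => if pv_get b "CreateTime" < pv_get form "CreateTime" then best.insert (pv_get form key) form else best) dB) := by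
  induction l generalizing dA dB with
  | nil => exact h
  | cons form l ih => exact ih _ _ (pvInv_step key dA dB h form)

theorem pv_final_eq (dA : PySem.Dict String (List (List (String × String))))
    (dB : PySem.Dict String (List (String × String))) (h : pvInv dA dB) :
    dA.keys.foldl (fun acc formID => acc ++ [get_latest_form (dA.getD formID [])]) [] = dB.values := by
  rw [PySem.List.foldl_append_singleton_eq_map, List.nil_append]
  have hnd : dA.keys.Nodup := h.2.2
  rw [PySem.Dict.values, h.1, List.map_map, PySem.Dict.items_eq_map_keys dA hnd [], List.map_map]
  rfl

theorem pv_equiv (form_lst : List (List (String × String))) (key : String) :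
    get_latest_forms form_lst key = get_latest_forms_alt form_lst key := by
  have h := pvInv_foldl key form_lst PySem.Dict.empty PySem.Dict.empty
    ⟨rfl, fun p hp => absurd hp (List.not_mem_nil), List.nodup_nil⟩
  exact pv_final_eq _ _ h

-- ===== VERDICT (by name: the statement is the Claim_ definition above) =====
theorem get_latest_forms_spec : Claim_equal_get_latest_forms := by
  intro form_lst key _ _
  exact pv_equiv form_lst key
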